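-- pv_equiv track=rewrite | github.com/artsy-compute/parallax | src/knowledge_service/store.py | _render_index_page_content
-- ===== SOURCE A (Python) =====
-- from typing import Any
--
-- def _render_index_page_content(pages: list[dict[str, Any]]) -> str:
--     sections: list[str] = ["# Index", "", "A catalog of the current wiki pages grouped by type.", ""]
--     page_type_titles = {
--         "source_summary": "Sources",
--         "entity": "Entities",
--         "concept": "Concepts",
--         "topic": "Topics",
--         "timeline": "Timelines",
--         "comparison": "Comparisons",
--     }
--     for page_type, section_title in page_type_titles.items():
--         items = [page for page in pages if page.get("page_type") == page_type]
--         if not items: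
--             continue
--         sections.extend([f"## {section_title}", ""])
--         for page in items:
--             line = f"- [{page['title']}](/knowledge/{page['id']})"
--             if str(page.get("summary") or "").strip():
--                 line += f" - {page['summary']}"
--             sections.append(line)
--         sections.append("")
--     return "\n".join(section for section in sections if section is not None).strip()
-- ===== SOURCE B (Python) =====
-- from typing import Any
--
-- def _render_index_page_content(pages: list[dict[str, Any]]) -> str:
--     page_type_titles = {
--         "source_summary": "Sources",
--         "entity": "Entities",
--         "concept": "Concepts",
--         "topic": "Topics",
--         "timeline": "Timelines",
--         "comparison": "Comparisons",
--     }
--     # One pass over pages: bucket each page by its (known) page_type.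
--     buckets: dict[str, list[dict[str, Any]]] = {}
--     for page in pages:
--         pt = page.get("page_type")
--         if pt in page_type_titles:
--             buckets.setdefault(pt, []).append(page)
--     sections: list[str] = ["# Index", "", "A catalog of the current wiki pages grouped by type.", ""]
--     for page_type, section_title in page_type_titles.items():
--         items = buckets.get(page_type, [])
--         if not items:
--             continue
--         sections.extend([f"## {section_title}", ""])
--         for page in items:
--             line = f"- [{page['title']}](/knowledge/{page['id']})"
--             if str(page.get("summary") or "").strip():
--                 line += f" - {page['summary']}"
--             sections.append(line)
--         sections.append("")
--     return "\n".join(sections).strip()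
-- ===== Notes on version B (the rewrite author's own statement) =====
-- stated objective: alternative
-- what changed: B buckets pages into a dict keyed by page_type in a single pass instead of A's six separate filter scans over the whole page list; rendering then reads each bucket directly (similar measured cost).
import Mathlib
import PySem

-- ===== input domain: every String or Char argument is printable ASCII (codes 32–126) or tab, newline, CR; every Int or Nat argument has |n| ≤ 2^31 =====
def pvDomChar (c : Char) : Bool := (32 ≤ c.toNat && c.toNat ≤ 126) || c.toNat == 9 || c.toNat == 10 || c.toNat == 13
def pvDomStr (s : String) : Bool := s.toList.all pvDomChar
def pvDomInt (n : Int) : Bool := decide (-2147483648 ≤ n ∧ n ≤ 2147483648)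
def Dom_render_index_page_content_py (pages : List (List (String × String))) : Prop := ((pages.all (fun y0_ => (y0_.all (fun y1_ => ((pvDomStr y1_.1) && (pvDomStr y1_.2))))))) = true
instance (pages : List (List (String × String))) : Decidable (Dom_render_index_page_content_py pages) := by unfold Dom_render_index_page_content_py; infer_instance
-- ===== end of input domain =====

-- B replaces A's six filter scans over the whole page list by a single dict-bucketing pass (objective: alternative single-pass grouping).

-- helpers shared by both ports (the Python line-formatting code is textually identical in A and B)
def pvTitles : List (String × String) :=
  [("source_summary", "Sources"), ("entity", "Entities"), ("concept", "Concepts"),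
   ("topic", "Topics"), ("timeline", "Timelines"), ("comparison", "Comparisons")]

def pvGet (page : List (String × String)) (k : String) : Option String :=
  (PySem.Dict.mk page).get? k

-- page['title'] / page['id'] raise KeyError in Python where pvGet is none; Pre_ excludes exactly those inputs
def pvLine (page : List (String × String)) : String :=
  let line := "- [" ++ (pvGet page "title").getD "" ++ "](/knowledge/" ++ (pvGet page "id").getD "" ++ ")"
  if PySem.Str.strip ((pvGet page "summary").getD "") = "" then line
  else line ++ " - " ++ (pvGet page "summary").getD ""

def pvHeader : List String := ["# Index", "", "A catalog of the current wiki pages grouped by type.", ""]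

-- ===== PORT A =====
def render_index_page_content_py (pages : List (List (String × String))) : String :=
  let sections := pvTitles.foldl (fun secs tt =>
    let items := pages.filter (fun page => pvGet page "page_type" == some tt.1)
    if items = [] then secs
    else (secs ++ ["## " ++ tt.2, ""] ++ items.map pvLine) ++ [""]) pvHeader
  PySem.Str.strip (PySem.Str.join "\n" sections)

-- ===== PORT B =====
-- one bucketing step: buckets.setdefault(pt, []).append(page) for a recognised page_type
def pvStep (d : PySem.Dict String (List (List (String × String)))) (page : List (String × String)) :
    PySem.Dict String (List (List (String × String))) :=
  match pvGet page "page_type" with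
  | some pt => if (PySem.Dict.mk pvTitles).contains pt then d.modify pt [] (· ++ [page]) else d
  | none => d

def render_index_page_content_py_alt (pages : List (List (String × String))) : String :=
  let buckets := pages.foldl pvStep PySem.Dict.empty
  let sections := pvTitles.foldl (fun secs tt =>
    let items := buckets.getD tt.1 []
    if items = [] then secs
    else (secs ++ ["## " ++ tt.2, ""] ++ items.map pvLine) ++ [""]) pvHeader
  PySem.Str.strip (PySem.Str.join "\n" sections)

-- ===== PRECONDITION & SPEC =====
-- Pre_ excludes exactly the inputs on which Python A raises KeyError: a page whose page_type is one
-- of the six known types but which lacks a 'title' or 'id' key (B raises the same KeyError there).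
def Pre_render_index_page_content_py (pages : List (List (String × String))) : Prop :=
  ∀ page ∈ pages,
    ((pvGet page "page_type").any (fun pt => (PySem.Dict.mk pvTitles).contains pt)) = true →
    (((PySem.Dict.mk page).contains "title") && ((PySem.Dict.mk page).contains "id")) = true
instance (pages : List (List (String × String))) : Decidable (Pre_render_index_page_content_py pages) := by
  unfold Pre_render_index_page_content_py; infer_instance
def pvWitness_render_index_page_content_py : (List (List (String × String))) :=
  [[("page_type", "entity"), ("title", "T"), ("id", "1"), ("summary", "s")],
   [("page_type", "bogus")]]

def Spec_render_index_page_content_py (pages : List (List (String × String))) (out : String) : Prop := out = render_index_page_content_py_alt pages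
instance (pages : List (List (String × String))) (out : String) : Decidable (Spec_render_index_page_content_py pages out) := by unfold Spec_render_index_page_content_py; infer_instance

-- ===== CLAIM (what is proved, stated in full; the proofs are below) =====
def Claim_equal_render_index_page_content_py : Prop := ∀ (pages : List (List (String × String))), Dom_render_index_page_content_py pages → Pre_render_index_page_content_py pages → Spec_render_index_page_content_py pages (render_index_page_content_py pages)

-- ===== LEMMAS AND PROOFS =====

-- B's bucket for a recognised page_type holds exactly the pages A's filter scan selects, in order
theorem pvBuckets_aux (pages : List (List (String × String))) (t : String)
    (ht : (PySem.Dict.mk pvTitles).contains t = true)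
    (d : PySem.Dict String (List (List (String × String)))) :
    (pages.foldl pvStep d).getD t []
      = d.getD t [] ++ pages.filter (fun page => pvGet page "page_type" == some t) := by
  induction pages generalizing d with
  | nil => simp
  | cons page rest ih =>
    rw [List.foldl_cons, List.filter_cons]
    cases hpt : pvGet page "page_type" with
    | none =>
      rw [show pvStep d page = d from by simp [pvStep, hpt], ih]
      simp
    | some pt =>
      by_cases hk : (PySem.Dict.mk pvTitles).contains pt = true
      · rw [show pvStep d page = d.modify pt [] (· ++ [page]) from by simp [pvStep, hpt, hk], ih]
        by_cases hEq : pt = t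
        · subst hEq
          rw [PySem.Dict.getD_modify_self]
          simp
        · rw [PySem.Dict.getD_modify]
          simp [hEq, Ne.symm hEq]
      · have hne : pt ≠ t := by rintro rfl; exact hk ht
        rw [show pvStep d page = d from by simp [pvStep, hpt, hk], ih]
        simp [hne]

theorem pvTitles_contains (tt : String × String) (h : tt ∈ pvTitles) :
    (PySem.Dict.mk pvTitles).contains tt.1 = true := by
  simp only [pvTitles, List.mem_cons, List.not_mem_nil, or_false] at h
  rcases h with rfl | rfl | rfl | rfl | rfl | rfl <;> decide

-- ===== VERDICT (by name: the statement is the Claim_ definition above) =====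
theorem render_index_page_content_py_spec : Claim_equal_render_index_page_content_py := by
  intro pages _ _
  unfold Spec_render_index_page_content_py render_index_page_content_py render_index_page_content_py_alt
  have hfold : pvTitles.foldl (fun secs (tt : String × String) =>
      let items := pages.filter (fun page => pvGet page "page_type" == some tt.1)
      if items = [] then secs
      else (secs ++ ["## " ++ tt.2, ""] ++ items.map pvLine) ++ [""]) pvHeader
    = pvTitles.foldl (fun secs (tt : String × String) =>
      let items := (pages.foldl pvStep PySem.Dict.empty).getD tt.1 []
      if items = [] then secs
      else (secs ++ ["## " ++ tt.2, ""] ++ items.map pvLine) ++ [""]) pvHeader := by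
    apply PySem.List.foldl_congr_mem
    intro acc tt htt
    rw [pvBuckets_aux pages tt.1 (pvTitles_contains tt htt) PySem.Dict.empty]
    simp [PySem.Dict.getD_empty]
  simp only [hfold]
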